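-- pv_equiv track=rewrite | github.com/Lab00700/Algorithm | 프로그래머스/1/160586. 대충 만든 자판/대충 만든 자판.py | solution
-- ===== SOURCE A (Python) =====
-- def solution(keymap, targets):
--     answer = []
--     min_key={}
--     for key in keymap:
--         for k in range(len(key)):
--             if key[k] not in min_key:
--                 min_key[key[k]]=k+1
--             elif min_key[key[k]]>k+1:
--                 min_key[key[k]]=k+1
--     for key in targets:
--         sum=0
--         for k in key:
--             if k not in min_key:
--                 sum=-1
--                 break
--             sum+=min_key[k]
--         answer.append(sum)
--     return answer
-- ===== SOURCE B (Python) =====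
-- def solution(keymap, targets):
--     def min_pos(c):
--         hits = [p for p in (key.find(c) for key in keymap) if p != -1]
--         return min(hits) if hits else None
--
--     table = {}
--     for t in targets:
--         for c in t:
--             if c not in table:
--                 table[c] = min_pos(c)
--
--     def cost(t):
--         presses = [table[c] for c in t]
--         return -1 if None in presses else sum(p + 1 for p in presses)
--
--     return [cost(t) for t in targets]
-- ===== Notes on version B (the rewrite author's own statement) =====
-- stated objective: alternative
-- what changed: B drops A's eager char->min-position dict built from the whole keymap and instead resolves each distinct target character on demand by scanning the keymap directly with str.find (first occurrence per key, then min over keys, memoized), aggregating per target in two staged passes (collect presses, then -1-or-sum) instead of A's running sum with a break sentinel.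
import Mathlib
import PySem

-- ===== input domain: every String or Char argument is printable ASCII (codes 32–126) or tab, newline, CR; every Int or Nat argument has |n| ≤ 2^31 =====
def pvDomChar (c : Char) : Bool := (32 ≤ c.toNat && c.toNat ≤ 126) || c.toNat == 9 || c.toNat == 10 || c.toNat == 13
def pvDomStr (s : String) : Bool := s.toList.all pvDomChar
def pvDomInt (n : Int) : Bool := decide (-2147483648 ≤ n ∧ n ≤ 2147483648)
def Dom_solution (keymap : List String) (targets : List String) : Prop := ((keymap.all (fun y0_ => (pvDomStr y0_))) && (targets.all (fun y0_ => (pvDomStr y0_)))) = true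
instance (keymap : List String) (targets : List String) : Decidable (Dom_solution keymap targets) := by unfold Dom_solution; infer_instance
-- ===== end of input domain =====

-- B drops A's eager char->min-position dict built from the whole keymap and instead
-- resolves each distinct target character on demand (scan keymap with str.find, min over
-- keys, memoized), aggregating each target in two staged passes: an alternative algorithm.


-- ===== PORT A =====
-- 'for k in range(len(key)): … key[k] …' transcribed as structural recursion carrying the index k
def pvBuildKey (key : List Char) (k : Int) (d : PySem.Dict Char Int) : PySem.Dict Char Int :=
  match key with
  | [] => d
  | ch :: rest =>
    let d' := match d.get? ch with
      | none => d.insert ch (k + 1)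
      | some v => if v > k + 1 then d.insert ch (k + 1) else d
    pvBuildKey rest (k + 1) d'

-- the inner 'for k in key' loop with 'sum' accumulator and the break-with-sentinel
def pvSumA (d : PySem.Dict Char Int) : List Char → Int → Int
  | [], s => s
  | c :: cs, s =>
    match d.get? c with
    | none => -1
    | some v => pvSumA d cs (s + v)

def solution (keymap : List String) (targets : List String) : List Int :=
  let minKey := keymap.foldl (fun d key => pvBuildKey key.toList 0 d) PySem.Dict.empty
  targets.foldl (fun answer key => answer ++ [pvSumA minKey key.toList 0]) []

-- ===== PORT B =====
-- 'hits = [p for p in (key.find(c) for key in keymap) if p != -1]; return min(hits) if hits else None'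
def pvMinPos (keymap : List String) (c : Char) : Option Int :=
  let hits := (keymap.map (fun key => PySem.Str.find key (String.ofList [c]))).filter (fun p => p ≠ -1)
  if hits = [] then none else PySem.List.min? hits (fun y => y)

-- 'for c in t: if c not in table: table[c] = min_pos(c)'
def pvFillT (keymap : List String) (t : List Char) (d : PySem.Dict Char (Option Int)) : PySem.Dict Char (Option Int) :=
  match t with
  | [] => d
  | c :: cs => pvFillT keymap cs (if d.contains c then d else d.insert c (pvMinPos keymap c))

-- 'presses = [table[c] for c in t]; return -1 if None in presses else sum(p + 1 for p in presses)'
-- (table[c]: every char of t was entered into table by the fill loop, so the getD default is never read)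
def pvCost (table : PySem.Dict Char (Option Int)) (t : List Char) : Int :=
  let presses := t.map (fun c => table.getD c none)
  if presses.contains none then -1 else (presses.map (fun o => o.getD 0 + 1)).sum

def solution_alt (keymap : List String) (targets : List String) : List Int :=
  let table := targets.foldl (fun d t => pvFillT keymap t.toList d) PySem.Dict.empty
  targets.map (fun t => pvCost table t.toList)

-- ===== PRECONDITION & SPEC =====
def Spec_solution (keymap : List String) (targets : List String) (out : List Int) : Prop := out = solution_alt keymap targets
instance (keymap : List String) (targets : List String) (out : List Int) : Decidable (Spec_solution keymap targets out) := by unfold Spec_solution; infer_instance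

-- ===== CLAIM (what is proved, stated in full; the proofs are below) =====
def Claim_equal_solution : Prop := ∀ (keymap : List String) (targets : List String), Dom_solution keymap targets → Spec_solution keymap targets (solution keymap targets)

-- ===== LEMMAS AND PROOFS =====

-- option-valued minimum: the combining operation A's dict update realises per key
def omin : Option Int → Option Int → Option Int
  | o, none => o
  | none, some x => some x
  | some v, some x => some (min v x)

def minO : List Int → Option Int
  | [] => none
  | x :: xs => omin (some x) (minO xs)

-- candidate presses (position + 1) contributed by one key, starting index k
def candsK : List Char → Int → Char → List Int
  | [], _, _ => []
  | a :: rest, k, c => if a = c then (k + 1) :: candsK rest (k + 1) c else candsK rest (k + 1) c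

-- all candidate presses for character c across the whole keymap
def candsAll (keymap : List String) (c : Char) : List Int :=
  keymap.flatMap (fun key => candsK key.toList 0 c)

theorem omin_none_right (o : Option Int) : omin o none = o := by cases o <;> rfl

theorem omin_none_left (o : Option Int) : omin none o = o := by cases o <;> rfl

theorem omin_assoc (a b c : Option Int) : omin (omin a b) c = omin a (omin b c) := by
  cases a <;> cases b <;> cases c <;> simp [omin, min_assoc]

theorem minO_append (xs ys : List Int) : minO (xs ++ ys) = omin (minO xs) (minO ys) := by
  induction xs with
  | nil => simp [minO, omin_none_left]
  | cons x t ih => simp [minO, ih, omin_assoc]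

theorem minO_mem : ∀ (xs : List Int) (m : Int), minO xs = some m → m ∈ xs := by
  intro xs
  induction xs with
  | nil => intro m h; simp [minO] at h
  | cons x t ih =>
    intro m h
    simp only [minO] at h
    cases ht : minO t with
    | none => rw [ht, omin_none_right] at h; simp at h; simp [h]
    | some v =>
      rw [ht] at h
      simp only [omin, Option.some.injEq] at h
      rcases min_cases x v with ⟨he, _⟩ | ⟨he, _⟩
      · rw [he] at h; simp [h]
      · rw [he] at h; subst h; exact List.mem_cons_of_mem _ (ih v ht)

theorem minO_le : ∀ (xs : List Int) (m : Int), minO xs = some m → ∀ y ∈ xs, m ≤ y := by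
  intro xs
  induction xs with
  | nil => intro m h; simp [minO] at h
  | cons x t ih =>
    intro m h y hy
    simp only [minO] at h
    cases ht : minO t with
    | none =>
      rw [ht, omin_none_right] at h
      simp at h
      have : t = [] := by
        cases t with
        | nil => rfl
        | cons a b => simp [minO] at ht; cases hb : minO b <;> rw [hb] at ht <;> simp [omin] at ht
      subst this; simp at hy; omega
    | some v =>
      rw [ht] at h
      simp only [omin, Option.some.injEq] at h
      subst h
      rcases List.mem_cons.mp hy with rfl | hy'
      · exact min_le_left _ _
      · exact le_trans (min_le_right _ _) (ih v ht y hy')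

theorem minO_cons_foldl (x : Int) (t : List Int) : minO (x :: t) = some (t.foldl min x) := by
  induction t generalizing x with
  | nil => rfl
  | cons y t' ih =>
    have h : minO (x :: y :: t') = minO (min x y :: t') := by
      show omin (some x) (omin (some y) (minO t')) = omin (some (min x y)) (minO t')
      rw [← omin_assoc]
      rfl
    rw [h, ih, List.foldl_cons]

-- ===== A-side characterisation: the dict A builds holds the minimum candidate =====

theorem buildKey_get (c : Char) :
    ∀ (l : List Char) (k : Int) (d : PySem.Dict Char Int),
      (pvBuildKey l k d).get? c = omin (d.get? c) (minO (candsK l k c)) := by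
  intro l
  induction l with
  | nil => intro k d; simp [pvBuildKey, candsK, minO, omin_none_right]
  | cons a rest ih =>
    intro k d
    show (pvBuildKey rest (k + 1) _).get? c = _
    rw [ih]
    have hstep :
        (match d.get? a with
          | none => d.insert a (k + 1)
          | some v => if v > k + 1 then d.insert a (k + 1) else d).get? c
          = omin (d.get? c) (if a = c then some (k + 1) else none) := by
      by_cases hac : a = c
      · subst hac
        cases hv : d.get? a with
        | none => simp [PySem.Dict.get?_insert_self, omin]
        | some v =>
          by_cases hlt : v > k + 1
          · simp [hlt, PySem.Dict.get?_insert_self, omin]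
            omega
          · simp [hv, hlt, omin]
            omega
      · cases hv : d.get? a with
        | none => simp [PySem.Dict.get?_insert_of_ne d (k+1) (Ne.symm hac), omin_none_right, hac]
        | some v =>
          by_cases hlt : v > k + 1 <;>
            simp [hlt, PySem.Dict.get?_insert_of_ne d (k+1) (Ne.symm hac), omin_none_right, hac]
    rw [hstep, omin_assoc]
    congr 1
    by_cases hac : a = c
    · simp [candsK, hac, minO]
    · simp [candsK, hac, omin_none_left]

theorem fold_build_get (c : Char) :
    ∀ (km : List String) (d : PySem.Dict Char Int),
      (km.foldl (fun d key => pvBuildKey key.toList 0 d) d).get? c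
        = omin (d.get? c) (minO (candsAll km c)) := by
  intro km
  induction km with
  | nil => intro d; simp [candsAll, minO, omin_none_right]
  | cons key rest ih =>
    intro d
    show (rest.foldl _ (pvBuildKey key.toList 0 d)).get? c = _
    rw [ih, buildKey_get]
    have : candsAll (key :: rest) c = candsK key.toList 0 c ++ candsAll rest c := by
      simp [candsAll]
    rw [this, minO_append, omin_assoc]

theorem minKey_get (km : List String) (c : Char) :
    ((km.foldl (fun d key => pvBuildKey key.toList 0 d) PySem.Dict.empty).get? c)
      = minO (candsAll km c) := by
  rw [fold_build_get, PySem.Dict.get?_empty, omin_none_left]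

-- ===== B-side characterisation: find-then-min over keys is the same minimum, shifted =====

-- membership in candsK: exactly the occurrence positions (+1)
theorem mem_candsK (c : Char) :
    ∀ (l : List Char) (k0 : Int) (x : Int),
      x ∈ candsK l k0 c ↔ ∃ j : Nat, l[j]? = some c ∧ x = k0 + j + 1 := by
  intro l
  induction l with
  | nil => intro k0 x; simp [candsK]
  | cons a rest ih =>
    intro k0 x
    by_cases hac : a = c
    · subst hac
      rw [show candsK (a :: rest) k0 a = (k0 + 1) :: candsK rest (k0 + 1) a by simp [candsK],
        List.mem_cons]
      constructor
      · rintro (rfl | hx)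
        · exact ⟨0, by simp⟩
        · obtain ⟨j, hj, hxe⟩ := (ih (k0 + 1) x).mp hx
          exact ⟨j + 1, by simpa using hj, by rw [hxe]; push_cast; ring⟩
      · rintro ⟨j, hj, hxe⟩
        cases j with
        | zero => left; rw [hxe]; norm_num
        | succ j' =>
          right
          exact (ih (k0 + 1) _).mpr ⟨j', by simpa using hj, by rw [hxe]; push_cast; ring⟩
    · rw [show candsK (a :: rest) k0 c = candsK rest (k0 + 1) c by simp [candsK, hac],
        ih (k0 + 1) x]
      constructor
      · rintro ⟨j, hj, hxe⟩
        exact ⟨j + 1, by simpa using hj, by rw [hxe]; push_cast; ring⟩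
      · rintro ⟨j, hj, hxe⟩
        cases j with
        | zero => simp at hj; exact absurd hj hac
        | succ j' => exact ⟨j', by simpa using hj, by rw [hxe]; push_cast; ring⟩

-- '[c] is a prefix of l.drop j' just says l[j] = c
theorem singleton_prefix_drop (l : List Char) (c : Char) (j : Nat) :
    [c] <+: l.drop j ↔ l[j]? = some c := by
  constructor
  · rintro ⟨t, ht⟩
    have : (l.drop j).head? = some c := by rw [← ht]; rfl
    rwa [List.head?_drop] at this
  · intro h
    have : (l.drop j).head? = some c := by rwa [List.head?_drop]
    cases hd : l.drop j with
    | nil => rw [hd] at this; simp at this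
    | cons a t =>
      rw [hd] at this
      simp at this
      exact ⟨t, by simp [this]⟩

-- per key: minO of the candidate list is find + 1 (or none when the char is absent)
theorem minO_candsK_eq_find (l : List Char) (c : Char) :
    minO (candsK l 0 c)
      = if PySem.Chars.find l [c] = -1 then none else some (PySem.Chars.find l [c] + 1) := by
  by_cases hf : PySem.Chars.find l [c] = -1
  · rw [if_pos hf]
    have hno : ¬ [c] <:+: l := (PySem.Chars.find_eq_neg_one_iff (s := l) (sub := [c])).mp hf
    cases hc : candsK l 0 c with
    | nil => simp [minO]
    | cons x xs =>
      exfalso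
      have hx : x ∈ candsK l 0 c := by rw [hc]; exact List.mem_cons_self
      obtain ⟨j, hj, _⟩ := (mem_candsK c l 0 x).mp hx
      exact hno (List.infix_iff_prefix_suffix.mpr
        ⟨l.drop j, (singleton_prefix_drop l c j).mpr hj, List.drop_suffix j l⟩)
  · rw [if_neg hf]
    have hge : 0 ≤ PySem.Chars.find l [c] := by
      have := PySem.Chars.neg_one_le_find l [c]; omega
    obtain ⟨hpre, hmin⟩ := PySem.Chars.find_spec (s := l) (sub := [c]) hge
    set n := (PySem.Chars.find l [c]).toNat with hn
    have hmem : (PySem.Chars.find l [c] + 1) ∈ candsK l 0 c := by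
      refine (mem_candsK c l 0 _).mpr ⟨n, (singleton_prefix_drop l c n).mp hpre, ?_⟩
      omega
    have hle : ∀ y ∈ candsK l 0 c, PySem.Chars.find l [c] + 1 ≤ y := by
      intro y hy
      obtain ⟨j, hj, hye⟩ := (mem_candsK c l 0 y).mp hy
      have : ¬ j < n := fun hlt => hmin j hlt ((singleton_prefix_drop l c j).mpr hj)
      omega
    -- minO is the unique least element
    cases hc : candsK l 0 c with
    | nil => rw [hc] at hmem; simp at hmem
    | cons x xs =>
      rw [minO_cons_foldl]
      have h1 := minO_mem (x :: xs) _ (minO_cons_foldl x xs)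
      have h2 := minO_le (x :: xs) _ (minO_cons_foldl x xs)
      rw [← hc] at h1 h2
      have := hle _ h1
      have := h2 _ hmem
      congr 1
      omega

-- omin commutes with shifting by +1
theorem omin_map_succ (a b : Option Int) :
    omin (a.map (fun p => p + 1)) (b.map (fun p => p + 1))
      = (omin a b).map (fun p => p + 1) := by
  cases a <;> cases b <;> simp [omin, Option.map]

-- 'min(hits) if hits else None' is exactly the option-minimum of the hits list
theorem ifmin_eq_minO (hs : List Int) :
    (if hs = [] then none else PySem.List.min? hs (fun y => y)) = minO hs := by
  cases hs with
  | nil => simp [minO]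
  | cons x t => rw [if_neg (by simp), PySem.List.min?_id_cons, minO_cons_foldl]

-- the whole-keymap minimum equals B's find-filter-min, shifted by +1
theorem minO_candsAll_eq_minPos (km : List String) (c : Char) :
    minO (candsAll km c) = (pvMinPos km c).map (fun p => p + 1) := by
  unfold pvMinPos
  rw [ifmin_eq_minO]
  induction km with
  | nil => simp [candsAll, minO]
  | cons key rest ih =>
    have hsplit : candsAll (key :: rest) c = candsK key.toList 0 c ++ candsAll rest c := by
      simp [candsAll]
    rw [hsplit, minO_append, ih, minO_candsK_eq_find]
    simp only [List.map_cons, PySem.Str.find_eq, String.toList_ofList]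
    by_cases hf : PySem.Chars.find key.toList [c] = -1
    · rw [List.filter_cons_of_neg (by simpa using hf), if_pos hf, omin_none_left]
    · rw [List.filter_cons_of_pos (by simpa using hf), if_neg hf]
      have hcons : minO (PySem.Chars.find key.toList [c] ::
          (rest.map (fun key => PySem.Chars.find key.toList [c])).filter (fun p => p ≠ -1))
          = omin (some (PySem.Chars.find key.toList [c]))
              (minO ((rest.map (fun key => PySem.Chars.find key.toList [c])).filter (fun p => p ≠ -1))) := rfl
      rw [hcons, ← omin_map_succ]
      rfl

-- per-target: A's break/sentinel sum equals B's two staged passes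
theorem sumA_eq_cost (km : List String) :
    ∀ (t : List Char) (s : Int),
      pvSumA (km.foldl (fun (d : PySem.Dict Char Int) (key : String) => pvBuildKey key.toList 0 d) PySem.Dict.empty) t s
        = if (t.map (fun c => pvMinPos km c)).contains none then -1
          else s + ((t.map (fun c => pvMinPos km c)).map (fun o => o.getD 0 + 1)).sum := by
  intro t
  induction t with
  | nil => intro s; simp [pvSumA]
  | cons c cs ih =>
    intro s
    have hget : (km.foldl (fun (d : PySem.Dict Char Int) (key : String) => pvBuildKey key.toList 0 d) PySem.Dict.empty).get? c
        = (pvMinPos km c).map (fun p => p + 1) := by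
      rw [minKey_get, minO_candsAll_eq_minPos]
    cases hv : pvMinPos km c with
    | none =>
      have hA : pvSumA (km.foldl (fun (d : PySem.Dict Char Int) (key : String) => pvBuildKey key.toList 0 d) PySem.Dict.empty)
          (c :: cs) s = -1 := by
        show (match (km.foldl (fun (d : PySem.Dict Char Int) (key : String) => pvBuildKey key.toList 0 d) PySem.Dict.empty).get? c with
          | none => (-1 : Int)
          | some v => pvSumA (km.foldl (fun (d : PySem.Dict Char Int) (key : String) => pvBuildKey key.toList 0 d) PySem.Dict.empty) cs (s + v)) = -1
        rw [hget, hv]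
        rfl
      rw [hA, if_pos (by simp [hv])]
    | some p =>
      have hA : pvSumA (km.foldl (fun (d : PySem.Dict Char Int) (key : String) => pvBuildKey key.toList 0 d) PySem.Dict.empty)
          (c :: cs) s
          = pvSumA (km.foldl (fun (d : PySem.Dict Char Int) (key : String) => pvBuildKey key.toList 0 d) PySem.Dict.empty) cs (s + (p + 1)) := by
        show (match (km.foldl (fun (d : PySem.Dict Char Int) (key : String) => pvBuildKey key.toList 0 d) PySem.Dict.empty).get? c with
          | none => (-1 : Int)
          | some v => pvSumA (km.foldl (fun (d : PySem.Dict Char Int) (key : String) => pvBuildKey key.toList 0 d) PySem.Dict.empty) cs (s + v)) = _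
        rw [hget, hv]
        rfl
      rw [hA, ih (s + (p + 1))]
      by_cases hnone : (cs.map (fun c => pvMinPos km c)).contains none
      · rw [if_pos hnone, if_pos (by simp only [List.map_cons, List.contains_cons, hnone, Bool.or_true])]
      · have hnone' : ∀ x ∈ cs, pvMinPos km x ≠ none := by simpa using hnone
        rw [if_neg hnone, if_neg (by simp [hv]; exact hnone')]
        simp only [List.map_cons, List.sum_cons, hv, Option.getD_some]
        ring

-- ===== table lemmas: the fill loop memoizes exactly min_pos =====

theorem fillT_mono (km : List String) :
    ∀ (t : List Char) (d : PySem.Dict Char (Option Int)) (c : Char) (v : Option Int),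
      d.get? c = some v → (pvFillT km t d).get? c = some v := by
  intro t
  induction t with
  | nil => intro d c v h; exact h
  | cons x cs ih =>
    intro d c v h
    show (pvFillT km cs _).get? c = some v
    apply ih
    by_cases hx : d.contains x
    · rw [if_pos hx]; exact h
    · rw [if_neg hx]
      by_cases hxc : x = c
      · subst hxc
        rw [PySem.Dict.contains_eq_isSome_get?, h] at hx
        simp at hx
      · rw [PySem.Dict.get?_insert_of_ne d (pvMinPos km x) (Ne.symm hxc)]
        exact h

theorem fillT_covers (km : List String) :
    ∀ (t : List Char) (d : PySem.Dict Char (Option Int)) (c : Char),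
      c ∈ t → ((pvFillT km t d).get? c).isSome := by
  intro t
  induction t with
  | nil => intro d c h; simp at h
  | cons x cs ih =>
    intro d c h
    by_cases hxc : c = x
    · subst hxc
      have hsome : ∃ v, (if d.contains c then d else d.insert c (pvMinPos km c)).get? c = some v := by
        by_cases hx : d.contains c
        · rw [if_pos hx]
          rw [PySem.Dict.contains_eq_isSome_get?] at hx
          exact Option.isSome_iff_exists.mp hx
        · rw [if_neg hx, PySem.Dict.get?_insert_self]
          exact ⟨_, rfl⟩
      obtain ⟨v, hv⟩ := hsome
      rw [show pvFillT km (c :: cs) d = pvFillT km cs (if d.contains c then d else d.insert c (pvMinPos km c)) from rfl,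
        fillT_mono km cs _ c v hv]
      rfl
    · rcases List.mem_cons.mp h with rfl | hmem
      · exact absurd rfl hxc
      · exact ih _ c hmem

theorem fillT_good (km : List String) :
    ∀ (t : List Char) (d : PySem.Dict Char (Option Int)),
      (∀ c v, d.get? c = some v → v = pvMinPos km c) →
      ∀ c v, (pvFillT km t d).get? c = some v → v = pvMinPos km c := by
  intro t
  induction t with
  | nil => intro d hd c v h; exact hd c v h
  | cons x cs ih =>
    intro d hd c v h
    refine ih _ ?_ c v h
    intro c' v' h'
    by_cases hx : d.contains x
    · rw [if_pos hx] at h'; exact hd c' v' h'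
    · rw [if_neg hx] at h'
      by_cases hxc : x = c'
      · subst hxc
        rw [PySem.Dict.get?_insert_self] at h'
        exact (Option.some.injEq _ _ ▸ h').symm ▸ rfl
      · rw [PySem.Dict.get?_insert_of_ne d (pvMinPos km x) (Ne.symm hxc)] at h'
        exact hd c' v' h'

theorem table_mono (km : List String) :
    ∀ (ts : List String) (d : PySem.Dict Char (Option Int)) (c : Char) (v : Option Int),
      d.get? c = some v → (ts.foldl (fun d t => pvFillT km t.toList d) d).get? c = some v := by
  intro ts
  induction ts with
  | nil => intro d c v h; exact h
  | cons t rest ih => intro d c v h; exact ih _ c v (fillT_mono km t.toList d c v h)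

theorem table_covers (km : List String) :
    ∀ (ts : List String) (d : PySem.Dict Char (Option Int)) (t : String) (c : Char),
      t ∈ ts → c ∈ t.toList →
      ((ts.foldl (fun d t => pvFillT km t.toList d) d).get? c).isSome := by
  intro ts
  induction ts with
  | nil => intro d t c ht; simp at ht
  | cons u rest ih =>
    intro d t c ht hc
    rcases List.mem_cons.mp ht with rfl | hmem
    · have := fillT_covers km t.toList d c hc
      obtain ⟨v, hv⟩ := Option.isSome_iff_exists.mp this
      rw [List.foldl_cons, table_mono km rest _ c v hv]
      rfl
    · exact ih _ t c hmem hc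

theorem table_good (km : List String) :
    ∀ (ts : List String) (d : PySem.Dict Char (Option Int)),
      (∀ c v, d.get? c = some v → v = pvMinPos km c) →
      ∀ c v, (ts.foldl (fun d t => pvFillT km t.toList d) d).get? c = some v → v = pvMinPos km c := by
  intro ts
  induction ts with
  | nil => intro d hd; exact hd
  | cons t rest ih => intro d hd; exact ih _ (fillT_good km t.toList d hd)

theorem table_getD (km : List String) (ts : List String) (t : String) (c : Char)
    (ht : t ∈ ts) (hc : c ∈ t.toList) :
    ((ts.foldl (fun d t => pvFillT km t.toList d) PySem.Dict.empty).getD c none)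
      = pvMinPos km c := by
  have hcov := table_covers km ts PySem.Dict.empty t c ht hc
  obtain ⟨v, hv⟩ := Option.isSome_iff_exists.mp hcov
  have hgood := table_good km ts PySem.Dict.empty
    (by intro c' v' h'; rw [PySem.Dict.get?_empty] at h'; cases h') c v hv
  rw [PySem.Dict.getD_eq_get?_getD, hv, Option.getD_some, hgood]

-- ===== VERDICT (by name: the statement is the Claim_ definition above) =====
theorem solution_spec : Claim_equal_solution := by
  intro keymap targets _
  unfold Spec_solution solution solution_alt
  rw [PySem.List.foldl_append_singleton_eq_map (fun key => pvSumA _ key.toList 0) targets []]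
  simp only [List.nil_append]
  apply List.map_congr_left
  intro t ht
  rw [sumA_eq_cost keymap t.toList 0]
  unfold pvCost
  have hmap : t.toList.map (fun c =>
      (targets.foldl (fun d t => pvFillT keymap t.toList d) PySem.Dict.empty).getD c none)
      = t.toList.map (fun c => pvMinPos keymap c) :=
    List.map_congr_left (fun c hc => table_getD keymap targets t c ht hc)
  simp only [hmap]
  simp
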